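-- pv_equiv track=rewrite | github.com/WehkawngZahkungShiengkat/Python-with-Genetic-Algorithm | GA Assignment.py | Selecting
-- ===== SOURCE A (Python) =====
-- def Selecting(llin):
--     SecondMin = llin[1]
--     firstMin = llin[0]
--     for c in range(1,len(llin)):
--         if llin[c][1]<firstMin[1]:
--             SecondMin = firstMin
--             firstMin = llin[c]
--         elif llin[c][1]<SecondMin[1]:
--             SecondMin = llin[c]
--     return firstMin,SecondMin
-- ===== SOURCE B (Python) =====
-- def Selecting(llin):
--     s = sorted(llin, key=lambda e: e[1])
--     return s[0], s[1]
-- ===== Notes on version B (the rewrite author's own statement) =====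
-- stated objective: simpler
-- what changed: Replaces the manual firstMin/SecondMin tracking scan with a stable sort on the second component followed by taking the first two elements.
import Mathlib
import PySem

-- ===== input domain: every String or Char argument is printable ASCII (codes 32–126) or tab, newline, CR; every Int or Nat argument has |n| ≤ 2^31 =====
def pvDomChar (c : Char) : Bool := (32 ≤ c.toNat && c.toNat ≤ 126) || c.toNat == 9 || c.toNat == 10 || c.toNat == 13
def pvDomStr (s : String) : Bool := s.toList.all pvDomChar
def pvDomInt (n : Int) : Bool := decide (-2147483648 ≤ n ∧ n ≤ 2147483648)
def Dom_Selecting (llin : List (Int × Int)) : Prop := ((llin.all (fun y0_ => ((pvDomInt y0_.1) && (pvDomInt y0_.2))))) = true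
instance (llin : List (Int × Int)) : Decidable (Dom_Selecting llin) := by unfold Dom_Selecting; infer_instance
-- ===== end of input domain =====

-- B changes the algorithm: a stable sort on the second component then the first two elements,
-- instead of A's single scan tracking firstMin/SecondMin. Not faster; simpler.

-- ===== PORT A =====
-- One step of A's loop body: state is (firstMin, SecondMin).
def selStep (st : (Int × Int) × (Int × Int)) (lc : Int × Int) : (Int × Int) × (Int × Int) :=
  if lc.2 < st.1.2 then (lc, st.1)
  else if lc.2 < st.2.2 then (st.1, lc)
  else st

def Selecting (llin : List (Int × Int)) : (Int × Int) × (Int × Int) :=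
  match llin with
  | l0 :: l1 :: _ =>
    -- for c in range(1, len(llin)): llin[c] (always in range; default never used)
    (PySem.List.pyRange 1 (llin.length : Int) 1).foldl
      (fun st c => selStep st (PySem.List.pyGetD llin c ((0 : Int), (0 : Int))))
      (l0, l1)
  | _ => (((0 : Int), (0 : Int)), ((0 : Int), (0 : Int)))  -- llin[0]/llin[1] raise IndexError: excluded by Pre_

-- ===== PORT B =====
-- first two elements of a list (lists of length < 2 are excluded by Pre_)
def firstTwo (l : List (Int × Int)) : (Int × Int) × (Int × Int) :=
  (l.headD ((0 : Int), (0 : Int)), l.tail.headD ((0 : Int), (0 : Int)))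

def Selecting_alt (llin : List (Int × Int)) : (Int × Int) × (Int × Int) :=
  firstTwo (PySem.List.sorted llin (fun e => e.2) false)

-- ===== PRECONDITION & SPEC =====
-- A evaluates llin[1]/llin[0] before the loop: it raises IndexError iff len(llin) < 2 (B raises there too).
def Pre_Selecting (llin : List (Int × Int)) : Prop := 2 ≤ llin.length
instance (llin : List (Int × Int)) : Decidable (Pre_Selecting llin) := by unfold Pre_Selecting; infer_instance
def pvWitness_Selecting : (List (Int × Int)) := [(1, 5), (2, 3), (3, 4)]

def Spec_Selecting (llin : List (Int × Int)) (out : (Int × Int) × (Int × Int)) : Prop := out = Selecting_alt llin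
instance (llin : List (Int × Int)) (out : (Int × Int) × (Int × Int)) : Decidable (Spec_Selecting llin out) := by unfold Spec_Selecting; infer_instance

-- ===== CLAIM (what is proved, stated in full; the proofs are below) =====
def Claim_equal_Selecting : Prop := ∀ (llin : List (Int × Int)), Dom_Selecting llin → Pre_Selecting llin → Spec_Selecting llin (Selecting llin)

-- ===== LEMMAS AND PROOFS =====

-- the comparison used by the stable insertion sort with key e.2
def selBefore (p q : Int × Int) : Bool := decide (p.2 < q.2)

-- first two of an insertion into a list with ≥ 2 elements = A's step on the old first two
theorem firstTwo_insertBy (x a b : Int × Int) (t : List (Int × Int)) :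
    ∃ t', PySem.List.insertBy selBefore x (a :: b :: t) =
      (selStep (a, b) x).1 :: (selStep (a, b) x).2 :: t' := by
  simp only [PySem.List.insertBy, selBefore, selStep]
  by_cases h1 : x.2 < a.2
  · simp [h1]
  · by_cases h2 : x.2 < b.2 <;> simp [h1, h2]

-- invariant: folding A's step over the remaining elements tracks the first two
-- elements of folding insertBy over them, whenever the accumulator has ≥ 2 elements
theorem foldl_step_eq_firstTwo (rest : List (Int × Int)) :
    ∀ (a b : Int × Int) (t : List (Int × Int)),
      rest.foldl selStep (a, b) =
      firstTwo (rest.foldl (fun acc x => PySem.List.insertBy selBefore x acc) (a :: b :: t)) := by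
  induction rest with
  | nil => intro a b t; simp [firstTwo]
  | cons x rs ih =>
    intro a b t
    obtain ⟨t', ht'⟩ := firstTwo_insertBy x a b t
    rw [List.foldl_cons, List.foldl_cons, ht']
    simpa using ih (selStep (a, b) x).1 (selStep (a, b) x).2 t'

theorem selecting_alt_cons (l0 l1 : Int × Int) (rest : List (Int × Int)) :
    Selecting_alt (l0 :: l1 :: rest) =
      rest.foldl selStep (selStep (l0, l1) l1) := by
  have hsorted : PySem.List.sorted (l0 :: l1 :: rest) (fun e : Int × Int => e.2) false =
      (l0 :: l1 :: rest).foldl (fun acc x => PySem.List.insertBy selBefore x acc) [] :=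
    PySem.List.sorted_eq_foldl_insertBy _ _
  unfold Selecting_alt
  rw [hsorted]
  simp only [List.foldl_cons]
  have h0 : PySem.List.insertBy selBefore l0 [] = [l0] := by simp [PySem.List.insertBy]
  rw [h0]
  by_cases h1 : l1.2 < l0.2
  · have : PySem.List.insertBy selBefore l1 [l0] = [l1, l0] := by
      simp [PySem.List.insertBy, selBefore, h1]
    rw [this, ← foldl_step_eq_firstTwo rest l1 l0 []]
    simp [selStep, h1]
  · have : PySem.List.insertBy selBefore l1 [l0] = [l0, l1] := by
      simp [PySem.List.insertBy, selBefore, h1]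
    rw [this, ← foldl_step_eq_firstTwo rest l0 l1 []]
    simp [selStep, h1]

-- ===== VERDICT (by name: the statement is the Claim_ definition above) =====
theorem Selecting_spec : Claim_equal_Selecting := by
  intro llin _hdom hpre
  match llin with
  | [] => simp [Pre_Selecting] at hpre
  | [_] => simp [Pre_Selecting] at hpre
  | l0 :: l1 :: rest =>
    unfold Spec_Selecting
    rw [selecting_alt_cons]
    rw [show Selecting (l0 :: l1 :: rest) =
        (PySem.List.pyRange 1 (((l0 :: l1 :: rest).length : Int)) 1).foldl
          (fun st c => selStep st (PySem.List.pyGetD (l0 :: l1 :: rest) c ((0 : Int), (0 : Int))))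
          (l0, l1) from rfl]
    rw [PySem.List.foldl_pyRange_pyGetD' (l0 :: l1 :: rest) ((0 : Int), (0 : Int)) selStep (l0, l1) (a := 1) (by norm_num)]
    simp [List.foldl_cons]
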